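-- pv_equiv track=rewrite | github.com/PabloR03/LFP_S2_2023_Proyecto2_202201947 | Analizador_Lexico.py | armar_lexema
-- ===== SOURCE A (Python) =====
-- def armar_lexema(cadena):
--     lexema = ''
--     puntero = ''
--     for char in cadena:
--         puntero += char
--         if char == '"' or char == '\n' or char == '\t' or char == '(' or char == ')' or char == ' ':
--             return lexema, cadena[len(puntero):]
--         else:
--             lexema += char
--     return None, None
-- ===== SOURCE B (Python) =====
-- def armar_lexema(cadena):
--     positions = [p for p in (cadena.find(d) for d in '"\n\t() ') if p != -1]
--     if not positions:
--         return None, None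
--     i = min(positions)
--     return cadena[:i], cadena[i + 1:]
-- ===== Notes on version B (the rewrite author's own statement) =====
-- stated objective: faster
-- what changed: A scans the string once left-to-right in a Python-level char loop with two growing accumulator strings; B instead computes str.find for each of the six delimiter characters, filters out the -1 misses, and takes the minimum position to slice prefix and remainder.
import Mathlib
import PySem

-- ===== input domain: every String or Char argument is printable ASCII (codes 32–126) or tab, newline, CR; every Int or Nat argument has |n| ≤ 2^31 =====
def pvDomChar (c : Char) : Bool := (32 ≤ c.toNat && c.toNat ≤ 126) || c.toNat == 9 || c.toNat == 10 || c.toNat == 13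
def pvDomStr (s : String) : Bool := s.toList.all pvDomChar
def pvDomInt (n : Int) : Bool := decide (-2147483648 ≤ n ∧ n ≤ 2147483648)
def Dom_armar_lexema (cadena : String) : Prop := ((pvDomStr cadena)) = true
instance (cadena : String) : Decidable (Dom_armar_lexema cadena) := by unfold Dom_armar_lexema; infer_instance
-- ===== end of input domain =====

-- B replaces A's per-character Python loop with growing accumulators by six str.find
-- calls combined with min (same O(n) result; measured constant-factor faster in Python).

-- ===== PORT A =====
-- the for-loop over cadena with the two growing string accumulators, as structural recursion
def armarLoop (cadena : String) (rest lexema puntero : List Char) : Option String × Option String :=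
  match rest with
  | [] => (none, none)
  | char :: rest' =>
    let puntero' := puntero ++ [char]
    if char == '"' || char == '\n' || char == '\t' || char == '(' || char == ')' || char == ' ' then
      (some (String.ofList lexema), some (PySem.Str.slice cadena (some ((puntero'.length : Nat) : Int)) none))
    else armarLoop cadena rest' (lexema ++ [char]) puntero'

def armar_lexema (cadena : String) : Option String × Option String :=
  armarLoop cadena cadena.toList [] []

-- ===== PORT B =====
def armar_lexema_alt (cadena : String) : Option String × Option String :=
  let positions := ((("\"\n\t() ").toList).map
      (fun d => PySem.Str.find cadena (String.ofList [d]))).filter (fun p => p != -1)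
  match PySem.List.min? positions (fun x => x) with
  | none => (none, none)
  | some i => (some (PySem.Str.slice cadena none (some i)),
               some (PySem.Str.slice cadena (some (i + 1)) none))

-- ===== PRECONDITION & SPEC =====
def Spec_armar_lexema (cadena : String) (out : Option String × Option String) : Prop := out = armar_lexema_alt cadena
instance (cadena : String) (out : Option String × Option String) : Decidable (Spec_armar_lexema cadena out) := by unfold Spec_armar_lexema; infer_instance

-- ===== CLAIM (what is proved, stated in full; the proofs are below) =====
def Claim_equal_armar_lexema : Prop := ∀ (cadena : String), Dom_armar_lexema cadena → Spec_armar_lexema cadena (armar_lexema cadena)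

-- ===== LEMMAS AND PROOFS =====

-- index (as a Nat) of the first delimiter character, the shared reference point
def firstDelim : List Char → Option Nat
  | [] => none
  | c :: cs =>
    if c == '"' || c == '\n' || c == '\t' || c == '(' || c == ')' || c == ' ' then some 0
    else (firstDelim cs).map (· + 1)

theorem singleton_prefix_iff (d : Char) (l : List Char) : [d] <+: l ↔ l[0]? = some d := by
  cases l with
  | nil => simp
  | cons x xs => simp [List.cons_prefix_iff]

theorem singleton_prefix_drop_iff (d : Char) (l : List Char) (i : Nat) :
    [d] <+: l.drop i ↔ l[i]? = some d := by
  rw [singleton_prefix_iff]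
  simp [List.getElem?_drop]

theorem infix_singleton_of_mem (d : Char) (l : List Char) (h : d ∈ l) : [d] <:+: l := by
  rw [← PySem.Chars.isIn_iff_infix, ← PySem.Chars.exists_prefix_drop_iff_isIn]
  obtain ⟨j, hj⟩ := List.mem_iff_getElem?.1 h
  exact ⟨j, (singleton_prefix_drop_iff d l j).2 hj⟩

theorem find_singleton_eq_of_first (d : Char) (l : List Char) (n : Nat)
    (h : l[n]? = some d) (hmin : ∀ i < n, l[i]? ≠ some d) :
    PySem.Chars.find l [d] = (n : Int) := by
  have hinf : [d] <:+: l := infix_singleton_of_mem d l (List.mem_iff_getElem?.2 ⟨n, h⟩)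
  have h0 : 0 ≤ PySem.Chars.find l [d] := (PySem.Chars.find_nonneg_iff l [d]).2 hinf
  obtain ⟨hpre, hlt⟩ := PySem.Chars.find_spec h0
  rw [singleton_prefix_drop_iff] at hpre
  have : (PySem.Chars.find l [d]).toNat = n := by
    by_contra hne
    rcases Nat.lt_or_ge (PySem.Chars.find l [d]).toNat n with hl | hg
    · exact hmin _ hl hpre
    · have : n < (PySem.Chars.find l [d]).toNat := by omega
      exact (hlt n this) ((singleton_prefix_drop_iff d l n).2 h)
  omega

theorem find_singleton_none (d : Char) (l : List Char) (h : d ∉ l) :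
    PySem.Chars.find l [d] = -1 := by
  rw [PySem.Chars.find_eq_neg_one_iff]
  intro hinf
  rw [← PySem.Chars.isIn_iff_infix, ← PySem.Chars.exists_prefix_drop_iff_isIn] at hinf
  obtain ⟨j, hj⟩ := hinf
  rw [singleton_prefix_drop_iff] at hj
  exact h (List.mem_iff_getElem?.2 ⟨j, hj⟩)

theorem find_singleton_cons (c d : Char) (l : List Char) :
    PySem.Chars.find (c :: l) [d] =
      if c = d then 0
      else if PySem.Chars.find l [d] = -1 then -1 else PySem.Chars.find l [d] + 1 := by
  split_ifs with h1 h2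
  · subst h1
    exact find_singleton_eq_of_first c (c :: l) 0 (by simp) (by omega)
  · apply find_singleton_none
    intro hm
    rcases List.mem_cons.1 hm with h | h
    · exact h1 h.symm
    · rw [PySem.Chars.find_eq_neg_one_iff] at h2
      exact h2 (infix_singleton_of_mem d l h)
  · have h0 : 0 ≤ PySem.Chars.find l [d] := by
      have := PySem.Chars.neg_one_le_find l [d]
      omega
    obtain ⟨hpre, hlt⟩ := PySem.Chars.find_spec h0
    rw [singleton_prefix_drop_iff] at hpre
    have := find_singleton_eq_of_first d (c :: l) ((PySem.Chars.find l [d]).toNat + 1)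
      (by simpa using hpre)
      (by
        intro i hi
        cases i with
        | zero => simpa using h1
        | succ j =>
          intro hj
          rw [List.getElem?_cons_succ] at hj
          exact hlt j (by omega) ((singleton_prefix_drop_iff d l j).2 hj))
    omega

theorem foldl_min_map_succ (l : List Int) (x : Int) :
    (l.map (· + 1)).foldl min (x + 1) = l.foldl min x + 1 := by
  induction l generalizing x with
  | nil => simp
  | cons y t ih =>
    simp only [List.map_cons, List.foldl_cons]
    rw [min_add_add_right, ih]

theorem min?_id_map_succ (l : List Int) :
    PySem.List.min? (l.map (· + 1)) (fun x => x) =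
      (PySem.List.min? l (fun x => x)).map (· + 1) := by
  cases l with
  | nil =>
    rw [(PySem.List.min?_eq_none_iff ([] : List Int) (fun x => x)).2 rfl]
    rfl
  | cons x t =>
    simp [PySem.List.min?_id_cons, foldl_min_map_succ]

theorem filter_shift (l : List Int) (hl : ∀ x ∈ l, -1 ≤ x) :
    ((l.map (fun x => if x = -1 then -1 else x + 1)).filter (fun p => p != -1)) =
      (l.filter (fun p => p != -1)).map (· + 1) := by
  induction l with
  | nil => simp
  | cons x t ih =>
    have hx := hl x (by simp)
    have ht : ∀ y ∈ t, -1 ≤ y := fun y hy => hl y (List.mem_cons_of_mem _ hy)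
    by_cases h : x = -1
    · subst h; simp [ih ht]
    · have h1 : (x + 1 : Int) ≠ -1 := by omega
      simp [h, h1, ih ht]

-- B's min-of-finds equals the index of the first delimiter
theorem min?_positions_eq (cs : List Char) :
    PySem.List.min? (((("\"\n\t() ").toList).map
        (fun d => PySem.Chars.find cs [d])).filter (fun p => p != -1)) (fun x => x) =
      (firstDelim cs).map (fun k => (k : Int)) := by
  induction cs with
  | nil => decide
  | cons c cs ih =>
    by_cases hc : (c == '"' || c == '\n' || c == '\t' || c == '(' || c == ')' || c == ' ') = true
    · -- first char is a delimiter: 0 is in the filtered list, every member is ≥ 0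
      have h0mem : (0 : Int) ∈ ((("\"\n\t() ").toList).map
          (fun d => PySem.Chars.find (c :: cs) [d])).filter (fun p => p != -1) := by
        rw [List.mem_filter]
        refine ⟨?_, by decide⟩
        rw [List.mem_map]
        refine ⟨c, ?_, by rw [find_singleton_cons]; simp⟩
        simp at hc
        rcases hc with ((((h | h) | h) | h) | h) | h <;> subst h <;> decide
      have hnonneg : ∀ p ∈ ((("\"\n\t() ").toList).map
          (fun d => PySem.Chars.find (c :: cs) [d])).filter (fun p => p != -1), (0 : Int) ≤ p := by
        intro p hp
        rw [List.mem_filter] at hp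
        obtain ⟨hp1, hp2⟩ := hp
        rw [List.mem_map] at hp1
        obtain ⟨d, _, hd⟩ := hp1
        have := PySem.Chars.neg_one_le_find (c :: cs) [d]
        simp at hp2
        omega
      have hne : ((("\"\n\t() ").toList).map
          (fun d => PySem.Chars.find (c :: cs) [d])).filter (fun p => p != -1) ≠ [] :=
        List.ne_nil_of_mem h0mem
      obtain ⟨m, hm⟩ : ∃ m, PySem.List.min? (((("\"\n\t() ").toList).map
          (fun d => PySem.Chars.find (c :: cs) [d])).filter (fun p => p != -1)) (fun x => x) = some m := by
        cases hmin : PySem.List.min? (((("\"\n\t() ").toList).map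
            (fun d => PySem.Chars.find (c :: cs) [d])).filter (fun p => p != -1)) (fun x => x) with
        | none => exact absurd ((PySem.List.min?_eq_none_iff _ _).1 hmin) hne
        | some m => exact ⟨m, rfl⟩
      have hmle : m ≤ 0 := PySem.List.min?_isMin hm 0 h0mem
      have hmge : 0 ≤ m := hnonneg m (PySem.List.min?_mem hm)
      rw [hm, show m = 0 by omega]
      simp [firstDelim, hc]
    · -- first char is no delimiter: every find shifts by one
      have hcd : ∀ d ∈ ("\"\n\t() ").toList, c ≠ d := by
        intro d hd hcd
        subst hcd
        simp at hd hc
        tauto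
      have hmap : (("\"\n\t() ").toList).map (fun d => PySem.Chars.find (c :: cs) [d]) =
          ((("\"\n\t() ").toList).map (fun d => PySem.Chars.find cs [d])).map
            (fun x => if x = -1 then -1 else x + 1) := by
        rw [List.map_map]
        apply List.map_congr_left
        intro d hd
        simp [find_singleton_cons, hcd d hd]
      rw [hmap, filter_shift _ (by
        intro x hx
        rw [List.mem_map] at hx
        obtain ⟨d, _, hd⟩ := hx
        have := PySem.Chars.neg_one_le_find cs [d]
        omega), min?_id_map_succ, ih]
      simp only [firstDelim, hc, if_false, Bool.false_eq_true]
      cases firstDelim cs <;> simp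

-- A's loop returns the first-delimiter decomposition
theorem armarLoop_eq (cadena : String) (rest lexema puntero : List Char) :
    armarLoop cadena rest lexema puntero =
      match firstDelim rest with
      | none => (none, none)
      | some k => (some (String.ofList (lexema ++ rest.take k)),
          some (PySem.Str.slice cadena (some ((puntero.length + k + 1 : Nat) : Int)) none)) := by
  induction rest generalizing lexema puntero with
  | nil => simp [armarLoop, firstDelim]
  | cons c rest ih =>
    by_cases hc : (c == '"' || c == '\n' || c == '\t' || c == '(' || c == ')' || c == ' ') = true
    · simp [armarLoop, firstDelim, hc]
    · rw [show armarLoop cadena (c :: rest) lexema puntero =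
          armarLoop cadena rest (lexema ++ [c]) (puntero ++ [c]) by
        simp [armarLoop, hc]]
      rw [ih]
      simp only [firstDelim, hc, Bool.false_eq_true, if_false]
      cases h : firstDelim rest with
      | none => simp
      | some k =>
        simp only [Option.map_some, List.take_succ_cons, List.length_append,
          List.length_cons, List.length_nil]
        refine Prod.ext ?_ ?_
        · simp [List.append_assoc]
        · show some (PySem.Str.slice cadena _ none) = some (PySem.Str.slice cadena _ none)
          congr 3
          push_cast
          ring

-- ===== VERDICT (by name: the statement is the Claim_ definition above) =====
theorem armar_lexema_spec : Claim_equal_armar_lexema := by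
  intro cadena _
  unfold Spec_armar_lexema
  unfold armar_lexema armar_lexema_alt
  rw [armarLoop_eq]
  simp only [PySem.Str.find_eq, String.toList_ofList]
  rw [min?_positions_eq]
  cases h : firstDelim cadena.toList with
  | none => simp
  | some k =>
    refine Prod.ext ?_ ?_
    · simp only [List.nil_append]
      refine congrArg some (String.toList_inj.1 ?_)
      rw [String.toList_ofList, PySem.Str.toList_slice]
      simp [PySem.Chars.slice_eq_listSlice, PySem.List.slice_to_natCast]
    · show some (PySem.Str.slice cadena _ none) = some (PySem.Str.slice cadena _ none)
      congr 3
      push_cast [List.length_nil]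
      ring
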